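-- pv_equiv track=rewrite | github.com/jakubmatousek/ZuvaksWorld | matrixTools.py | most_balanced
-- ===== SOURCE A (Python) =====
-- def most_balanced(elements):
--     '''tato symetricky usporadane hodnoty radku v matrixu'''
--     topN = 10**8
--     winIndex = None
--     for e in elements:
--         rs = 0
--         ls = 0
--         row = list(e).copy()
--         if len(row)%2==1:
--             del row[int((len(row)-1)/2)]
--         rowLen = len(row)
--         for colIn in range(rowLen):
--             if colIn < int(rowLen/2):
--                 ls+=row[colIn]
--             else:
--                 rs+=row[colIn]
--         wDiff = abs(rs-ls)
--         if wDiff < topN: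
--             topN = wDiff
--             winIndex = elements.index(e)
--     winEl = elements[winIndex]
--     return [winEl,winEl[::-1]]
-- ===== SOURCE B (Python) =====
-- def most_balanced(elements):
--     '''tato symetricky usporadane hodnoty radku v matrixu'''
--     diffs = [abs(sum(row[-1 - i] - row[i] for i in range(len(row) // 2)))
--              for row in elements]
--     win = elements[diffs.index(min(diffs))]
--     return [win, win[::-1]]
-- ===== Notes on version B (the rewrite author's own statement) =====
-- stated objective: faster
-- what changed: B is three staged passes instead of A's fused update loop: it builds a list of per-row diffs by a symmetric two-pointer pairing sum(row[-1-i]-row[i] for i in range(len//2)) (no row copy, no middle deletion, no per-index branch), then takes min(diffs) and recovers the winner with diffs.index; A mutates a copied row, runs an indexed inner loop with a branch, and rescans with elements.index on every improvement.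
import Mathlib
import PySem

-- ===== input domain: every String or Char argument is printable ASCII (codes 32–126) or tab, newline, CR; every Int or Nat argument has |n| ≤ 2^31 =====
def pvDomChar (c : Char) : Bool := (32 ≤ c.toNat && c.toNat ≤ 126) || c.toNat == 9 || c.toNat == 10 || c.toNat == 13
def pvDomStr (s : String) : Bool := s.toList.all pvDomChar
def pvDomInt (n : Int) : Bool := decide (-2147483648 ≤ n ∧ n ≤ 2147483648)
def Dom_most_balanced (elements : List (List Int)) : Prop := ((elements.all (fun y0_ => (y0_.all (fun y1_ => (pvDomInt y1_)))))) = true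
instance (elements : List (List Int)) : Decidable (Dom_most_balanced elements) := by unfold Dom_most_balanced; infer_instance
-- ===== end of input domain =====

-- B restructures A into three staged passes (two-pointer pairwise diffs list, min, index);
-- equivalence is about the return value.

-- ===== PORT A =====
-- per-row body of A's outer loop: copy, delete middle if odd length, inner index loop, abs diff
-- (len(row)%2 and int((len(row)-1)/2) / int(rowLen/2) are on nonnegative lengths, so Nat % and
-- Nat / are exact for them)
def pvRowDiffA (e : List Int) : Int :=
  let row0 := e  -- list(e).copy()
  let row := if row0.length % 2 == 1 then
      match PySem.List.pop? row0 (((row0.length - 1) / 2 : Nat) : Int) with  -- del row[...]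
      | some pr => pr.2
      | none => row0  -- unreachable: the index is in range
    else row0
  let half : Int := ((row.length / 2 : Nat) : Int)  -- int(rowLen/2)
  let p := (PySem.List.pyRange 0 (row.length : Int) 1).foldl
    (fun (p : Int × Int) colIn =>
      if colIn < half then (p.1 + PySem.List.pyGetD row colIn 0, p.2)  -- ls += row[colIn]
      else (p.1, p.2 + PySem.List.pyGetD row colIn 0))                 -- rs += row[colIn]
    (0, 0)  -- (ls, rs)
  |p.2 - p.1|  -- abs(rs-ls)

def pvStepA (elements : List (List Int)) (st : Int × Option Nat) (e : List Int) :
    Int × Option Nat :=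
  let wDiff := pvRowDiffA e
  if wDiff < st.1 then (wDiff, PySem.List.index? elements e) else st

def most_balanced (elements : List (List Int)) : List (List Int) :=
  let st := elements.foldl (pvStepA elements) (10 ^ 8, none)  -- (topN, winIndex)
  match st.2 with
  | none => []  -- Python: elements[None] raises TypeError (excluded by Pre_)
  | some j =>
    match PySem.List.pyGet? elements (j : Int) with
    | none => []  -- unreachable: index? yields an in-range index
    | some winEl => [winEl, (PySem.List.slice? winEl none none (-1)).getD []]  -- winEl[::-1]

-- ===== PORT B =====
-- the generator sum: abs(sum(row[-1 - i] - row[i] for i in range(len(row) // 2)))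
-- (both indices are always in range for i in that range, so pyGetD is exact)
def pvPairDiff (row : List Int) : Int :=
  |(PySem.List.pyRange 0 ((row.length / 2 : Nat) : Int) 1).foldl
     (fun acc i => acc + (PySem.List.pyGetD row (-1 - i) 0 - PySem.List.pyGetD row i 0)) 0|

def most_balanced_alt (elements : List (List Int)) : List (List Int) :=
  let diffs := elements.map pvPairDiff
  match PySem.List.min? diffs (fun x => x) with  -- min(diffs); none = ValueError on []
  | none => []  -- excluded by Pre_
  | some m =>
    match PySem.List.index? diffs m with  -- diffs.index(min(diffs))
    | none => []  -- unreachable: the minimum is a member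
    | some k =>
      match PySem.List.pyGet? elements (k : Int) with
      | none => []  -- unreachable: k indexes diffs, same length
      | some win => [win, (PySem.List.slice? win none none (-1)).getD []]  -- win[::-1]

-- ===== PRECONDITION & SPEC =====
-- Pre_ excludes exactly the inputs where A raises TypeError (elements[None]): the empty list,
-- and nonempty inputs where every row's half-sum difference is ≥ 10^8 (A's sentinel topN is
-- never beaten, winIndex stays None); on all other inputs A returns.
def Pre_most_balanced (elements : List (List Int)) : Prop :=
  ∃ e ∈ elements,
    |(e.drop (e.length / 2 + e.length % 2)).sum - (e.take (e.length / 2)).sum| < 10 ^ 8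

instance (elements : List (List Int)) : Decidable (Pre_most_balanced elements) := by
  unfold Pre_most_balanced; infer_instance

def pvWitness_most_balanced : List (List Int) := [[1, 2]]

def Spec_most_balanced (elements : List (List Int)) (out : List (List Int)) : Prop :=
  out = most_balanced_alt elements
instance (elements : List (List Int)) (out : List (List Int)) :
    Decidable (Spec_most_balanced elements out) := by unfold Spec_most_balanced; infer_instance

-- ===== CLAIM (what is proved, stated in full; the proofs are below) =====
def Claim_equal_most_balanced : Prop := ∀ (elements : List (List Int)),
  Dom_most_balanced elements → Pre_most_balanced elements →
  Spec_most_balanced elements (most_balanced elements)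

-- ===== LEMMAS AND PROOFS =====

-- the common per-row diff, in closed form
def pvD (e : List Int) : Int :=
  |(e.drop (e.length / 2 + e.length % 2)).sum - (e.take (e.length / 2)).sum|

-- A's inner index loop computes the two half sums of the (middle-deleted) row
theorem pvFoldSplit (row : List Int) (h : Nat) (hh : h ≤ row.length) (m : Nat)
    (hm : m ≤ row.length) (a b : Int) :
    (PySem.List.pyRange 0 (m : Int) 1).foldl
      (fun (p : Int × Int) colIn =>
        if colIn < (h : Int) then (p.1 + PySem.List.pyGetD row colIn 0, p.2)
        else (p.1, p.2 + PySem.List.pyGetD row colIn 0)) (a, b)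
    = (a + (row.take (min m h)).sum, b + ((row.drop h).take (m - h)).sum) := by
  induction m with
  | zero => simp [PySem.List.pyRange_one_eq_nil]
  | succ m ih =>
    have hm' : m ≤ row.length := Nat.le_of_succ_le hm
    have hcast : ((m + 1 : Nat) : Int) = (m : Int) + 1 := by push_cast; ring
    rw [hcast, PySem.List.pyRange_one_succ_right (by positivity), List.foldl_append,
      ih hm', List.foldl_cons, List.foldl_nil]
    have hget : PySem.List.pyGetD row (m : Int) 0 = row[m] := by
      rw [PySem.List.pyGetD_natCast]
      exact List.getD_eq_getElem _ _ (by omega)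
    by_cases hlt : m < h
    · rw [if_pos (by exact_mod_cast hlt), hget]
      have h1 : min m h = m := by omega
      have h2 : min (m + 1) h = m + 1 := by omega
      have h3 : m + 1 - h = m - h := by omega
      rw [h1, h2, h3, List.sum_take_succ _ _ (by omega)]
      simp only [Prod.mk.injEq, add_assoc, and_true]
      trivial
    · rw [if_neg (by exact_mod_cast hlt), hget]
      have h1 : min m h = h := by omega
      have h2 : min (m + 1) h = h := by omega
      have h3 : m + 1 - h = (m - h) + 1 := by omega
      rw [h1, h2, h3, List.sum_take_succ _ _ (by simp; omega)]
      rw [List.getElem_drop]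
      have h4 : h + (m - h) = m := by omega
      simp only [h4, Prod.mk.injEq, add_assoc, true_and]
      trivial

theorem pvFoldSplit2 (row : List Int) (h : Nat) (hh : h ≤ row.length) :
    (PySem.List.pyRange 0 (row.length : Int) 1).foldl
      (fun (p : Int × Int) colIn =>
        if colIn < (h : Int) then (p.1 + PySem.List.pyGetD row colIn 0, p.2)
        else (p.1, p.2 + PySem.List.pyGetD row colIn 0)) (0, 0)
    = ((row.take h).sum, (row.drop h).sum) := by
  rw [pvFoldSplit row h hh row.length le_rfl 0 0]
  have h1 : min row.length h = h := by omega
  have h2 : (row.drop h).take (row.length - h) = row.drop h :=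
    List.take_of_length_le (by simp)
  rw [h1, h2]
  simp

theorem pvRowDiffA_eq (e : List Int) : pvRowDiffA e = pvD e := by
  unfold pvRowDiffA pvD
  by_cases hpar : e.length % 2 = 1
  · have hb : (e.length % 2 == 1) = true := by simp [hpar]
    have hlen : 1 ≤ e.length := by omega
    have hkl : (e.length - 1) / 2 < e.length := by omega
    have hle : (e.eraseIdx ((e.length - 1) / 2)).length = e.length - 1 := by
      rw [List.length_eraseIdx]; simp [hkl]
    simp only [hb, if_true]
    rw [PySem.List.pop?_natCast e ((e.length - 1) / 2) hkl]
    dsimp only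
    have hhalf : (e.eraseIdx ((e.length - 1) / 2)).length / 2 = (e.length - 1) / 2 := by
      rw [hle]
    rw [hhalf, pvFoldSplit2 _ _ (by omega)]
    dsimp only
    rw [List.eraseIdx_eq_take_drop_succ]
    rw [List.take_left' (by rw [List.length_take]; omega)]
    rw [List.drop_left' (by rw [List.length_take]; omega)]
    have h2 : e.length / 2 + e.length % 2 = (e.length - 1) / 2 + 1 := by omega
    have h1 : e.length / 2 = (e.length - 1) / 2 := by omega
    rw [h2, h1]
  · have hb : (e.length % 2 == 1) = false := by simp [hpar]
    simp only [hb, Bool.false_eq_true, if_false]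
    rw [pvFoldSplit2 _ _ (by omega)]
    dsimp only
    have h2 : e.length / 2 + e.length % 2 = e.length / 2 := by omega
    rw [h2]

-- B's two-pointer generator sum computes the same two half sums
theorem pvPairFold (row : List Int) (m : Nat) (hm : m ≤ row.length / 2) (a : Int) :
    (PySem.List.pyRange 0 (m : Int) 1).foldl
      (fun acc i => acc + (PySem.List.pyGetD row (-1 - i) 0 - PySem.List.pyGetD row i 0)) a
    = a + ((row.drop (row.length - m)).sum - (row.take m).sum) := by
  induction m with
  | zero => simp [PySem.List.pyRange_one_eq_nil, List.drop_length]
  | succ m ih =>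
    have hm' : m ≤ row.length / 2 := Nat.le_of_succ_le hm
    have hn : m + 1 ≤ row.length := by omega
    have hcast : ((m + 1 : Nat) : Int) = (m : Int) + 1 := by push_cast; ring
    rw [hcast, PySem.List.pyRange_one_succ_right (by positivity), List.foldl_append,
      ih hm', List.foldl_cons, List.foldl_nil]
    have hneg : (-1 - (m : Int)) = -((m + 1 : Nat) : Int) := by push_cast; ring
    rw [hneg, PySem.List.pyGetD_neg_natCast row (m + 1) 0 (by omega) hn]
    have hget : PySem.List.pyGetD row (m : Int) 0 = row[m]'(by omega) := by
      rw [PySem.List.pyGetD_natCast]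
      exact List.getD_eq_getElem _ _ (by omega)
    rw [hget]
    have hdrop : row.drop (row.length - (m + 1))
        = row[row.length - (m + 1)]'(by omega) :: row.drop (row.length - m) := by
      have h5 : row.length - (m + 1) + 1 = row.length - m := by omega
      rw [List.drop_eq_getElem_cons (by omega), h5]
    rw [hdrop, List.sum_cons, List.sum_take_succ _ _ (by omega)]
    ring

theorem pvPairDiff_eq (row : List Int) : pvPairDiff row = pvD row := by
  unfold pvPairDiff pvD
  rw [pvPairFold row (row.length / 2) le_rfl 0]
  have h1 : row.length - row.length / 2 = row.length / 2 + row.length % 2 := by omega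
  rw [h1, zero_add]

-- first-match index really points at an equal element
theorem pvIndex_get (elements : List (List Int)) (e : List Int) (he : e ∈ elements) :
    ∃ j, PySem.List.index? elements e = some j ∧
      PySem.List.pyGet? elements (j : Int) = some e := by
  have h1 : (PySem.List.index? elements e).isSome :=
    (PySem.List.index?_isSome_iff elements e).mpr he
  obtain ⟨j, hj⟩ := Option.isSome_iff_exists.mp h1
  obtain ⟨hk, hke, -⟩ := PySem.List.getElem_of_index?_eq_some hj
  refine ⟨j, hj, ?_⟩
  rw [PySem.List.pyGet?_natCast, List.getElem?_eq_getElem hk, hke]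

-- invariant of A's outer loop over the processed prefix l: either nothing beat the sentinel
-- yet, or the prefix splits as l1 ++ r :: l2 around the stored winner row r (first minimum)
def pvInv (elements : List (List Int)) (l : List (List Int)) (sa : Int × Option Nat) : Prop :=
  (sa = (10 ^ 8, none) ∧ ∀ e ∈ l, 10 ^ 8 ≤ pvD e)
  ∨ ∃ l1 r l2 j, l = l1 ++ r :: l2 ∧ sa = (pvD r, some j) ∧ pvD r < 10 ^ 8 ∧
      PySem.List.pyGet? elements (j : Int) = some r ∧
      (∀ e ∈ l1, pvD r < pvD e) ∧ (∀ e ∈ l2, pvD r ≤ pvD e)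

theorem pvInv_step (elements : List (List Int)) (l : List (List Int)) (sa : Int × Option Nat)
    (e : List Int) (he : e ∈ elements) (h : pvInv elements l sa) :
    pvInv elements (l ++ [e]) (pvStepA elements sa e) := by
  obtain ⟨j0, hj0, hjget⟩ := pvIndex_get elements e he
  rcases h with ⟨ha, hall⟩ | ⟨l1, r, l2, j, hl, ha, hr8, hget, h1, h2⟩ <;> subst ha <;>
    unfold pvStepA <;> dsimp only <;> rw [pvRowDiffA_eq]
  · by_cases hlt : pvD e < 10 ^ 8
    · rw [if_pos hlt]
      refine Or.inr ⟨l, e, [], j0, rfl, by rw [hj0], hlt, hjget, ?_, by simp⟩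
      exact fun x hx => lt_of_lt_of_le hlt (hall x hx)
    · rw [if_neg hlt]
      refine Or.inl ⟨rfl, fun x hx => ?_⟩
      rcases List.mem_append.mp hx with hx | hx
      · exact hall x hx
      · simp at hx; subst hx; exact not_lt.mp hlt
  · subst hl
    by_cases hlt : pvD e < pvD r
    · rw [if_pos hlt]
      refine Or.inr ⟨l1 ++ r :: l2, e, [], j0, rfl, by rw [hj0], lt_trans hlt hr8, hjget,
        fun x hx => ?_, by simp⟩
      rcases List.mem_append.mp hx with hx | hx
      · exact lt_trans hlt (h1 x hx)
      · rcases List.mem_cons.mp hx with rfl | hx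
        · exact hlt
        · exact lt_of_lt_of_le hlt (h2 x hx)
    · rw [if_neg hlt]
      refine Or.inr ⟨l1, r, l2 ++ [e], j, by simp, rfl, hr8, hget, h1, fun x hx => ?_⟩
      rcases List.mem_append.mp hx with hx | hx
      · exact h2 x hx
      · simp at hx; subst hx; exact not_lt.mp hlt

theorem pvInv_fold (elements : List (List Int)) (t : List (List Int))
    (ht : ∀ x ∈ t, x ∈ elements) (l : List (List Int)) (sa : Int × Option Nat)
    (h : pvInv elements l sa) :
    pvInv elements (l ++ t) (t.foldl (pvStepA elements) sa) := by
  induction t generalizing l sa with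
  | nil => simpa using h
  | cons x s ih =>
    have := ih (fun y hy => ht y (List.mem_cons_of_mem x hy)) (l ++ [x]) _
      (pvInv_step elements l sa x (ht x List.mem_cons_self) h)
    simpa using this

-- ===== VERDICT (by name: the statement is the Claim_ definition above) =====
theorem most_balanced_spec : Claim_equal_most_balanced := by
  intro elements _hdom hpre
  unfold Pre_most_balanced at hpre
  have hinv := pvInv_fold elements elements (fun x hx => hx) [] (10 ^ 8, none)
    (Or.inl ⟨rfl, by simp⟩)
  rw [List.nil_append] at hinv
  rcases hinv with ⟨-, hall⟩ | ⟨l1, r, l2, j, hl, ha, hr8, hget, h1, h2⟩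
  · obtain ⟨e, he, hd⟩ := hpre
    exact absurd (hall e he) (by unfold pvD; omega)
  · -- A's side
    unfold Spec_most_balanced most_balanced most_balanced_alt
    rw [ha]
    dsimp only
    rw [hget]
    -- B's side: diffs = map pvD (l1 ++ r :: l2)
    have hmapeq : elements.map pvPairDiff = elements.map pvD :=
      List.map_congr_left (fun x _ => pvPairDiff_eq x)
    rw [hmapeq, hl, List.map_append, List.map_cons]
    have hmin_le : ∀ y ∈ List.map pvD l1 ++ pvD r :: List.map pvD l2, pvD r ≤ y := by
      intro y hy
      rcases List.mem_append.mp hy with hy | hy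
      · obtain ⟨x, hx, rfl⟩ := List.mem_map.mp hy
        exact le_of_lt (h1 x hx)
      · rcases List.mem_cons.mp hy with rfl | hy
        · exact le_rfl
        · obtain ⟨x, hx, rfl⟩ := List.mem_map.mp hy
          exact h2 x hx
    have hmem : pvD r ∈ List.map pvD l1 ++ pvD r :: List.map pvD l2 := by simp
    -- min? = some (pvD r)
    obtain ⟨x, t, hxt⟩ : ∃ x t, List.map pvD l1 ++ pvD r :: List.map pvD l2 = x :: t := by
      cases h' : List.map pvD l1 ++ pvD r :: List.map pvD l2 with
      | nil => exact absurd h' (by simp)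
      | cons a b => exact ⟨a, b, rfl⟩
    rw [hxt, PySem.List.min?_id_cons]
    have hfold := PySem.List.foldl_min_le t x
    have hfmem := PySem.List.foldl_min_mem t x
    have hle1 : t.foldl min x ≤ pvD r := by
      rw [hxt] at hmem
      rcases List.mem_cons.mp hmem with hx | hx
      · rw [hx]; exact hfold.1
      · exact hfold.2 _ hx
    have hle2 : pvD r ≤ t.foldl min x := by
      rcases hfmem with hx | hx
      · exact hmin_le _ (by rw [hxt, hx]; exact List.mem_cons_self)
      · exact hmin_le _ (by rw [hxt]; exact List.mem_cons_of_mem x hx)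
    have heq : t.foldl min x = pvD r := le_antisymm hle1 hle2
    dsimp only
    rw [heq, ← hxt]
    -- index? = some l1.length
    have hidx : PySem.List.index? (List.map pvD l1 ++ pvD r :: List.map pvD l2) (pvD r)
        = some (List.map pvD l1).length := by
      rw [PySem.List.index?_eq_some_iff]
      refine ⟨List.map pvD l1, List.map pvD l2, rfl, rfl, fun hc => ?_⟩
      obtain ⟨x', hx', hxe⟩ := List.mem_map.mp hc
      exact absurd hxe (ne_of_gt (h1 x' hx'))
    rw [hidx]
    dsimp only
    rw [List.length_map, PySem.List.pyGet?_append_length]
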